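-- pv_equiv track=rewrite | github.com/mounika558/maternalassistant | backend/utils/feature_extractor.py | detect_decelerations
-- ===== SOURCE A (Python) =====
-- def detect_decelerations(signal_data, baseline, threshold=15):
--     """Detect number of decelerations in FHR"""
--     decelerations = 0
--     in_deceleration = False
--
--     for val in signal_data:
--         if val < baseline - threshold:
--             if not in_deceleration:
--                 decelerations += 1
--                 in_deceleration = True
--         else:
--             in_deceleration = False
--
--     return decelerations
-- ===== SOURCE B (Python) =====
-- def detect_decelerations(signal_data, baseline, threshold=15):
--     """Detect number of decelerations in FHR"""
--     # Counting identity: each deceleration run of length k contributes k below-threshold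
--     # samples and k-1 adjacent below-below pairs, so runs = below_count - pair_count.
--     cutoff = baseline - threshold
--     below = [v < cutoff for v in signal_data]
--     return sum(below) - sum(x and y for x, y in zip(below, below[1:]))
-- ===== Notes on version B (the rewrite author's own statement) =====
-- stated objective: alternative
-- what changed: Replaces the stateful single-pass run detection with the arithmetic identity runs = (#below-threshold samples) - (#adjacent pairs both below threshold), computed from a boolean mask with no run/state tracking at all.
import Mathlib
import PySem

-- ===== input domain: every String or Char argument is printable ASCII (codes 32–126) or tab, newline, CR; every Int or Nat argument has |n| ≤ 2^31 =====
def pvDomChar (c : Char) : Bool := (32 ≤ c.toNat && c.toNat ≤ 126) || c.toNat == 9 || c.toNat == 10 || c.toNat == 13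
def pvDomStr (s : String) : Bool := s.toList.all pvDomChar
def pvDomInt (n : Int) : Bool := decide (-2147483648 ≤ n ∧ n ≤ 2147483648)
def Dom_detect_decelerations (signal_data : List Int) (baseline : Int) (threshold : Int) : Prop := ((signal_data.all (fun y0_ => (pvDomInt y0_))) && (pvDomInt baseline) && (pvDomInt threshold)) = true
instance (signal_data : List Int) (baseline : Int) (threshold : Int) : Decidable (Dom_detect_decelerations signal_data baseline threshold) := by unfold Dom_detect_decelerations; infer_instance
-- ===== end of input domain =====

-- B replaces the stateful run detection with the identity runs = #below − #adjacent below-below pairs; alternative, same cost.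
-- ===== PORT A =====
def detect_decelerations (signal_data : List Int) (baseline : Int) (threshold : Int) : Int :=
  (signal_data.foldl
    (fun (s : Int × Bool) val =>
      if val < baseline - threshold then
        if !s.2 then (s.1 + 1, true) else s
      else (s.1, false))
    (0, false)).1

-- ===== PORT B =====
def detect_decelerations_alt (signal_data : List Int) (baseline : Int) (threshold : Int) : Int :=
  let cutoff := baseline - threshold
  let below := signal_data.map (fun v => decide (v < cutoff))
  (below.foldl (fun (a : Int) x => a + (if x then 1 else 0)) 0)
  - ((below.zip below.tail).foldl (fun (a : Int) p => a + (if p.1 && p.2 then 1 else 0)) 0)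

-- ===== PRECONDITION & SPEC =====
def Spec_detect_decelerations (signal_data : List Int) (baseline : Int) (threshold : Int) (out : Int) : Prop := out = detect_decelerations_alt signal_data baseline threshold
instance (signal_data : List Int) (baseline : Int) (threshold : Int) (out : Int) : Decidable (Spec_detect_decelerations signal_data baseline threshold out) := by unfold Spec_detect_decelerations; infer_instance

-- ===== CLAIM (what is proved, stated in full; the proofs are below) =====
def Claim_equal_detect_decelerations : Prop := ∀ (signal_data : List Int) (baseline : Int) (threshold : Int), Dom_detect_decelerations signal_data baseline threshold → Spec_detect_decelerations signal_data baseline threshold (detect_decelerations signal_data baseline threshold)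

-- ===== LEMMAS AND PROOFS =====
-- count of true entries
def pvTrues : List Bool → Int
  | [] => 0
  | x :: xs => (if x then 1 else 0) + pvTrues xs

-- adjacent both-true pairs in (prev :: xs)
def pvPairs (prev : Bool) : List Bool → Int
  | [] => 0
  | x :: xs => (if prev && x then 1 else 0) + pvPairs x xs

lemma pv_loop_eq (baseline threshold : Int) :
    ∀ (xs : List Int) (c : Int) (prev : Bool),
      (xs.foldl
        (fun (s : Int × Bool) val =>
          if val < baseline - threshold then
            if !s.2 then (s.1 + 1, true) else s
          else (s.1, false)) (c, prev)).1
      = c + pvTrues (xs.map (fun v => decide (v < baseline - threshold)))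
          - pvPairs prev (xs.map (fun v => decide (v < baseline - threshold))) := by
  intro xs
  induction xs with
  | nil => intro c prev; simp [pvTrues, pvPairs]
  | cons x xs ih =>
    intro c prev
    by_cases hx : x < baseline - threshold
    · cases prev <;>
        simp only [List.foldl_cons, List.map_cons, hx, if_pos, Bool.not_false, Bool.not_true,
          if_true, if_false, pvTrues, pvPairs, ih, decide_eq_true hx] <;> simp <;> omega
    · simp only [List.foldl_cons, List.map_cons, hx, if_neg, pvTrues, pvPairs, ih,
        decide_eq_false hx]
      simp

lemma pv_trues_fold : ∀ (bs : List Bool) (c : Int),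
    bs.foldl (fun (a : Int) x => a + (if x then 1 else 0)) c = c + pvTrues bs := by
  intro bs
  induction bs with
  | nil => intro c; simp [pvTrues]
  | cons b bs ih =>
    intro c
    rw [List.foldl_cons, ih]
    cases b <;> simp [pvTrues] <;> ring

lemma pv_pairs_fold : ∀ (bs : List Bool) (x : Bool) (c : Int),
    ((x :: bs).zip bs).foldl (fun (a : Int) p => a + (if p.1 && p.2 then 1 else 0)) c
      = c + pvPairs x bs := by
  intro bs
  induction bs with
  | nil => intro x c; simp [pvPairs]
  | cons y ys ih =>
    intro x c
    simp only [List.zip_cons_cons, List.foldl_cons, ih, pvPairs]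
    ring

lemma pv_pairs_false (bs : List Bool) :
    (bs.zip bs.tail).foldl (fun (a : Int) p => a + (if p.1 && p.2 then 1 else 0)) 0
      = pvPairs false bs := by
  cases bs with
  | nil => simp [pvPairs]
  | cons x xs => simpa [pvPairs] using pv_pairs_fold xs x 0

-- ===== VERDICT (by name: the statement is the Claim_ definition above) =====
theorem detect_decelerations_spec : Claim_equal_detect_decelerations := by
  intro signal_data baseline threshold _
  unfold Spec_detect_decelerations detect_decelerations detect_decelerations_alt
  rw [pv_loop_eq]
  simp only [pv_trues_fold, pv_pairs_false]
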